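-- pv_equiv track=rewrite | github.com/jblake95/Orbits | tlelements.py | _calculate
-- ===== SOURCE A (Python) =====
-- def _calculate(line):
--     """
--     Calculate checksum
--     """
--     checksum = 0
--     for character in line:
--         if character.isnumeric():
--             checksum += int(character)
--         elif character.isalpha():
--             continue
--         elif character.isspace():
--             continue
--         else:
--             if character == '-':
--                 checksum += 1
--             else:
--                 continue
--     return checksum % 10
-- ===== SOURCE B (Python) =====
-- def _calculate(line):
--     """
--     Calculate checksum
--     """
--     freq = {}
--     for character in line:
--         freq[character] = freq.get(character, 0) + 1
--     total = freq.get('-', 0)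
--     for value, digit in enumerate('0123456789'):
--         total += value * freq.get(digit, 0)
--     return total % 10
-- ===== Notes on version B (the rewrite author's own statement) =====
-- stated objective: alternative
-- what changed: Replaces A's per-character branching accumulator with a histogram: one pass builds a character frequency table, then the checksum is a weighted sum over the fixed 11-symbol alphabet ('-' and the ten digits) of their counts, mod 10.
import Mathlib
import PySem

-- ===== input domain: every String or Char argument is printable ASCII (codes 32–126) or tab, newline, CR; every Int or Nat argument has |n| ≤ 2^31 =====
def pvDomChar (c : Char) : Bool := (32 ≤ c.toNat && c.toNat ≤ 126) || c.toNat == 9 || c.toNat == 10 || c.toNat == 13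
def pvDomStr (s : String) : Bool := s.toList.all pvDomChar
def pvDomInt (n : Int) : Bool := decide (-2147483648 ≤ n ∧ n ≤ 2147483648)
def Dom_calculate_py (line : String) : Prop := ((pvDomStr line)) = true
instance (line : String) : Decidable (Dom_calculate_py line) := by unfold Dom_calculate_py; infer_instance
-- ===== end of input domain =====

-- B replaces A's per-character branching accumulator with a histogram: one counting pass builds a
-- frequency table, then the checksum is a weighted sum of the counts of the 11 relevant symbols, mod 10.
-- ===== PORT A =====
-- A: accumulator loop over the characters, branch per character class, then % 10.
-- (Python's isnumeric/isalpha/isspace coincide with the ASCII predicates on the stated printable-ASCII domain.)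
def calculate_py (line : String) : Int :=
  PySem.Int.mod
    (line.toList.foldl (fun checksum c =>
      if PySem.Chars.isdigit c then checksum + ((c.toNat : Int) - 48)
      else if PySem.Chars.isalpha c then checksum
      else if PySem.Chars.isspace c then checksum
      else if c = '-' then checksum + 1
      else checksum) 0) 10

-- ===== PORT B =====
-- B: build a character-frequency dict in one pass, then a weighted sum over the fixed alphabet.
def calculate_py_alt (line : String) : Int :=
  let freq : PySem.Dict Char Int :=
    line.toList.foldl (fun d c => d.insert c (d.getD c 0 + 1)) PySem.Dict.empty
  let total : Int := freq.getD '-' 0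
  let total :=
    (PySem.List.enumerate "0123456789".toList 0).foldl
      (fun t p => t + p.1 * freq.getD p.2 0) total
  PySem.Int.mod total 10

-- ===== PRECONDITION & SPEC =====
def Spec_calculate_py (line : String) (out : Int) : Prop := out = calculate_py_alt line
instance (line : String) (out : Int) : Decidable (Spec_calculate_py line out) := by unfold Spec_calculate_py; infer_instance

-- ===== CLAIM (what is proved, stated in full; the proofs are below) =====
def Claim_equal_calculate_py : Prop := ∀ (line : String), Dom_calculate_py line → Spec_calculate_py line (calculate_py line)

-- ===== LEMMAS AND PROOFS =====

-- A's loop computes the digit-value sum plus the '-' count.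
lemma calc_loop_eq (l : List Char) (acc : Int) :
    l.foldl (fun checksum c =>
      if PySem.Chars.isdigit c then checksum + ((c.toNat : Int) - 48)
      else if PySem.Chars.isalpha c then checksum
      else if PySem.Chars.isspace c then checksum
      else if c = '-' then checksum + 1
      else checksum) acc
    = acc + ((l.filter PySem.Chars.isdigit).map (fun c => ((c.toNat : Int) - 48))).sum
        + (l.count '-' : Int) := by
  induction l generalizing acc with
  | nil => simp
  | cons c l ih =>
    simp only [List.foldl_cons, List.filter_cons, List.count_cons]
    by_cases hd : PySem.Chars.isdigit c
    · have hne : ¬ (c == '-') := by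
        intro h; rw [beq_iff_eq] at h; subst h; simp [PySem.Chars.isdigit] at hd
      simp [hd, hne, ih]; ring
    · by_cases hm : c = '-'
      · subst hm
        rw [if_neg (by decide), if_neg (by decide), if_neg (by decide), if_pos rfl, ih]
        simp only [beq_self_eq_true, if_pos, if_neg hd]
        push_cast; ring
      · have hne : ¬ (c == '-') := by simpa using hm
        simp only [hd, hne]
        by_cases ha : PySem.Chars.isalpha c
        · simp [ha, ih]
        · by_cases hs : PySem.Chars.isspace c
          · simp [ha, hs, ih]
          · simp [ha, hs, hm, ih]

-- a numeric character is one of the ten digit characters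
lemma digit_cases (c : Char) (h : PySem.Chars.isdigit c = true) :
    c = '0' ∨ c = '1' ∨ c = '2' ∨ c = '3' ∨ c = '4' ∨
    c = '5' ∨ c = '6' ∨ c = '7' ∨ c = '8' ∨ c = '9' := by
  simp only [PySem.Chars.isdigit, Bool.and_eq_true, decide_eq_true_eq] at h
  obtain ⟨h1, h2⟩ := h
  rw [Char.le_def] at h1 h2
  have hn : 48 ≤ c.toNat ∧ c.toNat ≤ 57 := by
    constructor
    · exact_mod_cast h1
    · exact_mod_cast h2
  have hofnat := Char.ofNat_toNat c
  have hcase : c.toNat = 48 ∨ c.toNat = 49 ∨ c.toNat = 50 ∨ c.toNat = 51 ∨ c.toNat = 52 ∨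
      c.toNat = 53 ∨ c.toNat = 54 ∨ c.toNat = 55 ∨ c.toNat = 56 ∨ c.toNat = 57 := by omega
  have hc : c = Char.ofNat c.toNat := hofnat.symm
  rcases hcase with hk | hk | hk | hk | hk | hk | hk | hk | hk | hk <;>
    rw [hk] at hc <;> subst hc <;> decide

-- the digit-value sum over a list is the count-weighted sum over the ten digit characters
lemma digit_weighted (l : List Char) :
    ((l.filter PySem.Chars.isdigit).map (fun c => ((c.toNat : Int) - 48))).sum
    = 0 * (l.count '0' : Int) + 1 * (l.count '1' : Int) + 2 * (l.count '2' : Int)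
      + 3 * (l.count '3' : Int) + 4 * (l.count '4' : Int) + 5 * (l.count '5' : Int)
      + 6 * (l.count '6' : Int) + 7 * (l.count '7' : Int) + 8 * (l.count '8' : Int)
      + 9 * (l.count '9' : Int) := by
  induction l with
  | nil => simp
  | cons c l ih =>
    simp only [List.filter_cons, List.count_cons]
    by_cases hd : PySem.Chars.isdigit c
    · rcases digit_cases c hd with rfl | rfl | rfl | rfl | rfl | rfl | rfl | rfl | rfl | rfl <;>
        simp only [hd, if_pos, List.map_cons, List.sum_cons, ih] <;>
        first
          | (simp; ring)
          | simp
    · have hne : ∀ d : Char, PySem.Chars.isdigit d = true → c ≠ d := by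
        intro d hdig hcd; subst hcd; exact hd hdig
      rw [if_neg hd, ih]
      have h0 := hne '0' (by decide); have h1 := hne '1' (by decide)
      have h2 := hne '2' (by decide); have h3 := hne '3' (by decide)
      have h4 := hne '4' (by decide); have h5 := hne '5' (by decide)
      have h6 := hne '6' (by decide); have h7 := hne '7' (by decide)
      have h8 := hne '8' (by decide); have h9 := hne '9' (by decide)
      simp [beq_iff_eq, h0, h1, h2, h3, h4, h5, h6, h7, h8, h9]

-- ===== VERDICT (by name: the statement is the Claim_ definition above) =====
theorem calculate_py_spec : Claim_equal_calculate_py := by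
  intro line _
  unfold Spec_calculate_py calculate_py calculate_py_alt
  rw [calc_loop_eq]
  have henum : PySem.List.enumerate "0123456789".toList 0
      = [(0,'0'),(1,'1'),(2,'2'),(3,'3'),(4,'4'),(5,'5'),(6,'6'),(7,'7'),(8,'8'),(9,'9')] := by
    decide
  rw [henum]
  simp only [List.foldl_cons, List.foldl_nil,
    PySem.Dict.getD_foldl_insert_add_one, PySem.Dict.getD_empty]
  rw [digit_weighted]
  congr 1
  ring
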